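-- pv_equiv track=rewrite | github.com/voxeronai-tech/voxeron-voice-agent | src/api/_legacy/ordering_session_planner_2025-12-29.py | _pick_simple_upsell
-- ===== SOURCE A (Python) =====
-- from typing import Any, Dict, List, Optional, Sequence, Tuple
--
-- def _pick_simple_upsell(menu_items: Sequence[str], cart_lower: Sequence[str], lang: str) -> List[str]:
--     """
--     Very simple upsell: prefer rice/naan/drinks/dessert not already in cart.
--     """
--     prefer = ["rice", "rijst", "naan", "garlic", "knoflook", "lassi", "mango", "kulfi", "dessert", "bier", "beer"]
--     picked: List[str] = []
--
--     def ok_item(x: str) -> bool: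
--         xl = x.lower()
--         if any(c in xl for c in cart_lower):
--             return False
--         return True
--
--     for p in prefer:
--         for it in menu_items:
--             if len(picked) >= 3:
--                 break
--             if p in it.lower() and ok_item(it) and it not in picked:
--                 picked.append(it)
--         if len(picked) >= 3:
--             break
--
--     # fallback: any 3 not in cart
--     if len(picked) < 3:
--         for it in menu_items:
--             if len(picked) >= 3:
--                 break
--             if ok_item(it) and it not in picked:
--                 picked.append(it)
--
--     return picked[:3]
-- ===== SOURCE B (Python) =====
-- from typing import List, Sequence
--
--
-- def _pick_simple_upsell(menu_items: Sequence[str], cart_lower: Sequence[str], lang: str) -> List[str]: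
--     """
--     Single pass: bucket each eligible (not-in-cart, first-occurrence) menu item by
--     the index of the first matching prefer-keyword (len(prefer) if none), then take
--     the first 3 items of the concatenated buckets (a counting-sort by priority).
--     """
--     prefer = ["rice", "rijst", "naan", "garlic", "knoflook", "lassi", "mango", "kulfi", "dessert", "bier", "beer"]
--     buckets: List[List[str]] = [[] for _ in range(len(prefer) + 1)]
--     seen = set()
--     for it in menu_items:
--         if it in seen:
--             continue
--         xl = it.lower()
--         if any(c in xl for c in cart_lower):
--             continue
--         seen.add(it)
--         pr = next((i for i, p in enumerate(prefer) if p in xl), len(prefer))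
--         buckets[pr].append(it)
--     flat = [it for b in buckets for it in b]
--     return flat[:3]
-- ===== Notes on version B (the rewrite author's own statement) =====
-- stated objective: alternative
-- what changed: Replaces A's keyword-major nested loops (re-scanning the menu once per prefer keyword plus a fallback pass) by a single item-major pass that buckets each eligible, first-occurrence menu item under the index of its first matching keyword (a counting sort by priority) and returns the first 3 of the flattened buckets.
import Mathlib
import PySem

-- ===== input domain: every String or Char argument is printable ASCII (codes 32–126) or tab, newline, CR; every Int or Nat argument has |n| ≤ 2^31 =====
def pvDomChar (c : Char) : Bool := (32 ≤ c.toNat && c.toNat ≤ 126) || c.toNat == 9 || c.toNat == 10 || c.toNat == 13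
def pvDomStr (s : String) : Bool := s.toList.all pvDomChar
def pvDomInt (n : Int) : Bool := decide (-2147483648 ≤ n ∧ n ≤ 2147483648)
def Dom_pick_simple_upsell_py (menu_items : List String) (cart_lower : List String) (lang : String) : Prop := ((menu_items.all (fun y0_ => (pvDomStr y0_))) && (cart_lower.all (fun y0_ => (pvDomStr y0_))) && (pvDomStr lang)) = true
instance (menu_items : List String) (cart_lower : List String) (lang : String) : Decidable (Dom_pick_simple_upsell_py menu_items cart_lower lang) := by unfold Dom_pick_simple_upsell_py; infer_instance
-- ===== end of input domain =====

-- B replaces A's keyword-major nested re-scanning by one item-major pass that buckets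
-- eligible items by the index of their first matching keyword (a counting sort) and
-- takes the first 3 of the flattened buckets; objective: alternative/simpler traversal.

-- ===== PORT A =====
-- the `prefer` keyword list of the Python source
def pyPrefer : List String :=
  ["rice", "rijst", "naan", "garlic", "knoflook", "lassi", "mango", "kulfi", "dessert", "bier", "beer"]

-- A's nested `ok_item` (x is eligible iff no cart entry is a substring of x.lower())
def pyOkItem (cart_lower : List String) (x : String) : Bool :=
  !(cart_lower.any (fun c => PySem.Str.isIn c (PySem.Str.lower x)))

def pick_simple_upsell_py (menu_items : List String) (cart_lower : List String) (lang : String) : List String :=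
  -- for p in prefer: for it in menu_items: … (breaks modelled by the length-3 guards)
  let picked : List String :=
    pyPrefer.foldl (fun picked p =>
      if picked.length ≥ 3 then picked
      else menu_items.foldl (fun picked it =>
        if picked.length ≥ 3 then picked
        else if PySem.Str.isIn p (PySem.Str.lower it) && pyOkItem cart_lower it && !(picked.contains it)
          then picked ++ [it] else picked) picked) []
  -- fallback: any 3 not in cart
  let picked :=
    if picked.length < 3 then
      menu_items.foldl (fun picked it =>
        if picked.length ≥ 3 then picked
        else if pyOkItem cart_lower it && !(picked.contains it)
          then picked ++ [it] else picked) picked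
    else picked
  picked.take 3

-- ===== PORT B =====
def pick_simple_upsell_py_alt (menu_items : List String) (cart_lower : List String) (lang : String) : List String :=
  -- buckets = [[] for _ in range(len(prefer)+1)]; seen = set()
  ((menu_items.foldl (fun (st : List (List String) × PySem.Set String) it =>
      if PySem.Set.contains st.2 it then st
      else if cart_lower.any (fun c => PySem.Str.isIn c (PySem.Str.lower it)) then st
      else
        (st.1.modify ((pyPrefer.findIdx? (fun p =>
            PySem.Str.isIn p (PySem.Str.lower it))).getD pyPrefer.length) (fun b => b ++ [it]),
         PySem.Set.add st.2 it))
    (List.replicate (pyPrefer.length + 1) ([] : List String), PySem.Set.empty)).1.flatten).take 3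
  -- flat = [it for b in buckets for it in b]; return flat[:3] (the two lines above)

-- ===== PRECONDITION & SPEC =====
def Spec_pick_simple_upsell_py (menu_items : List String) (cart_lower : List String) (lang : String) (out : List String) : Prop := out = pick_simple_upsell_py_alt menu_items cart_lower lang
instance (menu_items : List String) (cart_lower : List String) (lang : String) (out : List String) : Decidable (Spec_pick_simple_upsell_py menu_items cart_lower lang out) := by unfold Spec_pick_simple_upsell_py; infer_instance

-- ===== CLAIM (what is proved, stated in full; the proofs are below) =====
def Claim_equal_pick_simple_upsell_py : Prop := ∀ (menu_items : List String) (cart_lower : List String) (lang : String), Dom_pick_simple_upsell_py menu_items cart_lower lang → Spec_pick_simple_upsell_py menu_items cart_lower lang (pick_simple_upsell_py menu_items cart_lower lang)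

-- ===== LEMMAS AND PROOFS =====

-- priority of an item: index of the first prefer keyword contained in it.lower(), 11 if none
def pvPrio (it : String) : Nat :=
  (pyPrefer.findIdx? (fun p => PySem.Str.isIn p (PySem.Str.lower it))).getD pyPrefer.length

-- the sequence of eligible, priority-k items of m (first occurrences w.r.t. seen), in menu order
def pvG (cart : List String) (k : Nat) (seen : List String) : List String → List String
  | [] => []
  | it :: r =>
    if pyOkItem cart it && pvPrio it == k && !(seen.contains it)
    then it :: pvG cart k (seen ++ [it]) r
    else pvG cart k seen r

-- concatenation of the priority groups 0 .. n-1
def pvFlat (cart menu : List String) (n : Nat) : List String :=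
  (List.range n).flatMap (fun k => pvG cart k [] menu)

theorem pvPrio_le (it : String) : pvPrio it ≤ 11 := by
  unfold pvPrio
  cases h : pyPrefer.findIdx? (fun p => PySem.Str.isIn p (PySem.Str.lower it)) with
  | none => simp [pyPrefer]
  | some i =>
    rw [List.findIdx?_eq_some_iff_getElem] at h
    obtain ⟨hi, -, -⟩ := h
    have hi' : i < 11 := by simpa [pyPrefer] using hi
    simp only [Option.getD_some]
    omega

theorem pvPrio_isIn {it : String} {k : Nat} (hk : k < 11)
    (h : pvPrio it = k) : PySem.Str.isIn (pyPrefer.getD k "") (PySem.Str.lower it) = true := by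
  unfold pvPrio at h
  cases hfi : pyPrefer.findIdx? (fun p => PySem.Str.isIn p (PySem.Str.lower it)) with
  | none => rw [hfi] at h; simp [pyPrefer] at h; omega
  | some i =>
    rw [hfi] at h; simp at h; subst h
    rw [List.findIdx?_eq_some_iff_getElem] at hfi
    obtain ⟨hi, hp, _⟩ := hfi
    rw [List.getD_eq_getElem _ _ (by simpa [pyPrefer] using hi)]
    exact hp

theorem pvPrio_le_of_isIn {it : String} {k : Nat} (hk : k < 11)
    (h : PySem.Str.isIn (pyPrefer.getD k "") (PySem.Str.lower it) = true) : pvPrio it ≤ k := by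
  unfold pvPrio
  cases hfi : pyPrefer.findIdx? (fun p => PySem.Str.isIn p (PySem.Str.lower it)) with
  | none =>
    rw [List.findIdx?_eq_none_iff] at hfi
    have := hfi (pyPrefer.getD k "") (by
      have hk' : k < pyPrefer.length := by simp [pyPrefer]; omega
      rw [List.getD_eq_getElem _ _ hk']; exact List.getElem_mem hk')
    rw [this] at h
    simp at h
  | some i =>
    rw [List.findIdx?_eq_some_iff_getElem] at hfi
    obtain ⟨hi, hp, hmin⟩ := hfi
    simp only [Option.getD_some]
    by_contra hlt
    push_neg at hlt
    have hk' : k < pyPrefer.length := by simp [pyPrefer]; omega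
    exact (hmin k hlt) (by rw [List.getD_eq_getElem _ _ hk'] at h; exact h)

-- members of pvG have the stated priority and eligibility, and come from m
theorem pvG_mem {cart : List String} {k : Nat} {m seen : List String} {x : String}
    (h : x ∈ pvG cart k seen m) : pyOkItem cart x = true ∧ pvPrio x = k ∧ x ∈ m := by
  induction m generalizing seen with
  | nil => simp [pvG] at h
  | cons it r ih =>
    rw [pvG] at h
    split at h
    · rename_i hc
      rcases List.mem_cons.mp h with h | h
      · subst h
        simp only [Bool.and_eq_true, beq_iff_eq] at hc
        exact ⟨hc.1.1, hc.1.2, List.mem_cons_self⟩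
      · obtain ⟨h1, h2, h3⟩ := ih h; exact ⟨h1, h2, List.mem_cons_of_mem _ h3⟩
    · obtain ⟨h1, h2, h3⟩ := ih h; exact ⟨h1, h2, List.mem_cons_of_mem _ h3⟩

-- completeness: an eligible priority-k member of m is in pvG or already seen
theorem pvG_complete {cart : List String} {k : Nat} {m seen : List String} {x : String}
    (hm : x ∈ m) (hok : pyOkItem cart x = true) (hp : pvPrio x = k) :
    x ∈ pvG cart k seen m ∨ x ∈ seen := by
  induction m generalizing seen with
  | nil => simp at hm
  | cons it r ih =>
    rw [pvG]
    rcases List.mem_cons.mp hm with h | h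
    · subst h
      by_cases hs : x ∈ seen
      · exact Or.inr hs
      · rw [if_pos (by simp [hok, hp, hs])]
        exact Or.inl List.mem_cons_self
    · split
      · rcases ih h with h' | h'
        · exact Or.inl (List.mem_cons_of_mem _ h')
        · rcases List.mem_append.mp h' with h'' | h''
          · exact Or.inr h''
          · simp at h''; subst h''; exact Or.inl List.mem_cons_self
      · exact ih h

-- pvG only depends on seen through its priority-k eligible members
theorem pvG_congr {cart : List String} {k : Nat} {m : List String} {s₁ s₂ : List String}
    (h : ∀ x, pvPrio x = k → pyOkItem cart x = true → (x ∈ s₁ ↔ x ∈ s₂)) :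
    pvG cart k s₁ m = pvG cart k s₂ m := by
  induction m generalizing s₁ s₂ with
  | nil => rfl
  | cons it r ih =>
    rw [pvG, pvG]
    by_cases hok : pyOkItem cart it = true
    · by_cases hp : pvPrio it = k
      · have hmem : it ∈ s₁ ↔ it ∈ s₂ := h it hp hok
        by_cases hs : it ∈ s₁
        · rw [if_neg (by simp [hs]), if_neg (by simp [hmem.mp hs])]
          exact ih h
        · rw [if_pos (by simp [hok, hp, hs]), if_pos (by simp [hok, hp, (by rw [← hmem]; exact hs : it ∉ s₂)])]
          congr 1
          exact ih (fun x hx hox => by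
            simp only [List.mem_append, List.mem_singleton]
            rw [h x hx hox])
      · rw [if_neg (by simp [hp]), if_neg (by simp [hp])]; exact ih h
    · rw [if_neg (by simp [hok]), if_neg (by simp [hok])]; exact ih h

-- the invariant carried through A's loops: every eligible item of priority < k is already picked
def pvInv (cart menu : List String) (k : Nat) (s : List String) : Prop :=
  ∀ it ∈ menu, pyOkItem cart it = true → pvPrio it < k → it ∈ s

theorem pvInv_mono {cart menu : List String} {k : Nat} {s s' : List String}
    (h : pvInv cart menu k s) (hss : ∀ x ∈ s, x ∈ s') : pvInv cart menu k s' :=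
  fun it hm hok hp => hss it (h it hm hok hp)

-- generic inner-loop lemma: A's item scan appends exactly the priority-k group, truncated at 3
theorem pvInner (cart menu : List String) (k : Nat) (C : String → List String → Bool)
    (HC : ∀ it s, it ∈ menu → pvInv cart menu k s →
      C it s = (pyOkItem cart it && pvPrio it == k && !(s.contains it))) :
    ∀ (m picked : List String), (∀ it ∈ m, it ∈ menu) → pvInv cart menu k picked →
      picked.length ≤ 3 →
      m.foldl (fun picked it =>
        if picked.length ≥ 3 then picked
        else if C it picked then picked ++ [it] else picked) picked
      = (picked ++ pvG cart k picked m).take 3 := by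
  intro m
  induction m with
  | nil => intro picked _ _ hlen; simp [pvG, List.take_of_length_le hlen]
  | cons it r ih =>
    intro picked hm hinv hlen
    rw [List.foldl_cons, pvG]
    by_cases h3 : picked.length ≥ 3
    · have hlen3 : picked.length = 3 := le_antisymm hlen h3
      rw [if_pos h3]
      have := ih picked (fun x hx => hm x (List.mem_cons_of_mem _ hx)) hinv hlen
      rw [this]
      rw [List.take_append, List.take_append, List.take_of_length_le hlen, hlen3]
      simp
    · rw [if_neg h3]
      have hCit := HC it picked (hm it List.mem_cons_self) hinv
      by_cases hc : (pyOkItem cart it && pvPrio it == k && !(picked.contains it)) = true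
      · rw [hCit, if_pos hc, if_pos hc]
        have hnew : pvInv cart menu k (picked ++ [it]) :=
          pvInv_mono hinv (fun x hx => List.mem_append_left _ hx)
        have := ih (picked ++ [it]) (fun x hx => hm x (List.mem_cons_of_mem _ hx)) hnew
          (by simp; omega)
        rw [this, List.append_assoc]
        simp
      · rw [hCit, if_neg hc, if_neg hc]
        exact ih picked (fun x hx => hm x (List.mem_cons_of_mem _ hx)) hinv hlen

-- pvFlat facts
theorem pvFlat_succ (cart menu : List String) (n : Nat) :
    pvFlat cart menu (n + 1) = pvFlat cart menu n ++ pvG cart n [] menu := by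
  unfold pvFlat
  rw [List.range_succ, List.flatMap_append]
  simp

theorem pvInv_flat (cart menu : List String) (k : Nat) :
    pvInv cart menu k (pvFlat cart menu k) := by
  intro it hm hok hp
  unfold pvFlat
  rw [List.mem_flatMap]
  refine ⟨pvPrio it, by simp [List.mem_range, hp], ?_⟩
  rcases pvG_complete (seen := []) hm hok rfl with h | h
  · exact h
  · simp at h

theorem pvFlat_prio_lt {cart menu : List String} {k : Nat} {x : String}
    (h : x ∈ pvFlat cart menu k) : pvPrio x < k := by
  unfold pvFlat at h
  rw [List.mem_flatMap] at h
  obtain ⟨j, hj, hx⟩ := h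
  rw [List.mem_range] at hj
  have := (pvG_mem hx).2.1
  omega

-- one outer round: from the (truncated) groups < k to the (truncated) groups < k+1
theorem pvRound (cart menu : List String) (k : Nat) (p : String) (hk : k < 11)
    (hp : pyPrefer.getD k "" = p) (picked : List String)
    (hpicked : picked = (pvFlat cart menu k).take 3) :
    (if picked.length ≥ 3 then picked
     else menu.foldl (fun picked it =>
        if picked.length ≥ 3 then picked
        else if PySem.Str.isIn p (PySem.Str.lower it) && pyOkItem cart it && !(picked.contains it)
          then picked ++ [it] else picked) picked)
    = (pvFlat cart menu (k + 1)).take 3 := by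
  by_cases h3 : picked.length ≥ 3
  · rw [if_pos h3]
    have hflen : 3 ≤ (pvFlat cart menu k).length := by
      by_contra hcon
      push_neg at hcon
      rw [hpicked, List.take_of_length_le (by omega)] at h3
      omega
    rw [pvFlat_succ, List.take_append, hpicked]
    have : (3 - (pvFlat cart menu k).length) = 0 := by omega
    rw [this]
    simp
  · rw [if_neg h3]
    have hlt : picked.length < 3 := by omega
    have hflen : (pvFlat cart menu k).length < 3 := by
      by_contra hcon
      push_neg at hcon
      rw [hpicked, List.length_take] at hlt
      omega
    have hpe : picked = pvFlat cart menu k := by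
      rw [hpicked, List.take_of_length_le (by omega)]
    have HC : ∀ it s, it ∈ menu → pvInv cart menu k s →
        (PySem.Str.isIn p (PySem.Str.lower it) && pyOkItem cart it && !(s.contains it))
        = (pyOkItem cart it && pvPrio it == k && !(s.contains it)) := by
      intro it s hmem hinv
      by_cases hok : pyOkItem cart it = true
      · by_cases hs : it ∈ s
        · have hc : s.contains it = true := by simpa using hs
          rw [hc]; simp
        · have hsc : s.contains it = false := by simpa using hs
          by_cases hin : PySem.Str.isIn p (PySem.Str.lower it) = true
          · have heq : pvPrio it = k := by
              have hle : pvPrio it ≤ k := pvPrio_le_of_isIn hk (by rw [hp]; exact hin)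
              rcases Nat.lt_or_ge (pvPrio it) k with hlt' | hge
              · exact absurd (hinv it hmem hok hlt') hs
              · omega
            rw [hin, hok]
            simp [heq]
          · have hne : pvPrio it ≠ k := by
              intro hcon
              exact hin (by rw [← hp]; exact pvPrio_isIn hk hcon)
            rw [Bool.not_eq_true] at hin
            rw [hin]
            simp [hne]
      · rw [Bool.not_eq_true] at hok
        rw [hok]
        simp
    rw [pvInner cart menu k _ HC menu picked (fun _ h => h)
        (by rw [hpe]; exact pvInv_flat cart menu k) (by omega)]
    rw [pvFlat_succ]
    congr 2
    rw [hpe]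
    apply pvG_congr
    intro x hx hox
    constructor
    · intro hmem
      exact absurd (pvFlat_prio_lt hmem) (by omega)
    · intro h; simp at h
-- fallback loop: the same with the "no keyword" group 11
theorem pvFallback (cart menu : List String) (picked : List String)
    (hpicked : picked = (pvFlat cart menu 11).take 3) :
    (if picked.length < 3 then
      menu.foldl (fun picked it =>
        if picked.length ≥ 3 then picked
        else if pyOkItem cart it && !(picked.contains it)
          then picked ++ [it] else picked) picked
     else picked)
    = (pvFlat cart menu 12).take 3 := by
  by_cases h3 : picked.length < 3
  · rw [if_pos h3]
    have hflen : (pvFlat cart menu 11).length < 3 := by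
      by_contra hcon
      push_neg at hcon
      rw [hpicked, List.length_take] at h3
      omega
    have hpe : picked = pvFlat cart menu 11 := by
      rw [hpicked, List.take_of_length_le (by omega)]
    have HC : ∀ it s, it ∈ menu → pvInv cart menu 11 s →
        (pyOkItem cart it && !(s.contains it))
        = (pyOkItem cart it && pvPrio it == 11 && !(s.contains it)) := by
      intro it s hmem hinv
      by_cases hok : pyOkItem cart it = true
      · by_cases hs : it ∈ s
        · have hc : s.contains it = true := by simpa using hs
          rw [hc]; simp
        · have heq : pvPrio it = 11 := by
            rcases Nat.lt_or_ge (pvPrio it) 11 with hlt' | hge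
            · exact absurd (hinv it hmem hok hlt') hs
            · have := pvPrio_le it; omega
          rw [hok]
          simp [heq]
      · rw [Bool.not_eq_true] at hok
        rw [hok]
        simp
    rw [pvInner cart menu 11 _ HC menu picked (fun _ h => h)
        (by rw [hpe]; exact pvInv_flat cart menu 11) (by omega)]
    rw [show (12 : Nat) = 11 + 1 from rfl, pvFlat_succ]
    congr 2
    rw [hpe]
    apply pvG_congr
    intro x hx hox
    constructor
    · intro hmem
      exact absurd (pvFlat_prio_lt hmem) (by omega)
    · intro h; simp at h
  · rw [if_neg h3]
    push_neg at h3
    have hflen : 3 ≤ (pvFlat cart menu 11).length := by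
      by_contra hcon
      push_neg at hcon
      rw [hpicked, List.take_of_length_le (by omega)] at h3
      omega
    rw [show (12 : Nat) = 11 + 1 from rfl, pvFlat_succ, List.take_append, hpicked]
    have : (3 - (pvFlat cart menu 11).length) = 0 := by omega
    rw [this]
    simp

-- the outer keyword loop, from round n on, with picked = truncated groups < n
theorem pvOuter (cart menu : List String) :
    ∀ (ps : List String) (n : Nat) (picked : List String),
      pyPrefer.drop n = ps → n ≤ 11 → picked = (pvFlat cart menu n).take 3 →
      ps.foldl (fun picked p =>
        if picked.length ≥ 3 then picked
        else menu.foldl (fun picked it =>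
          if picked.length ≥ 3 then picked
          else if PySem.Str.isIn p (PySem.Str.lower it) && pyOkItem cart it && !(picked.contains it)
            then picked ++ [it] else picked) picked) picked
      = (pvFlat cart menu 11).take 3 := by
  intro ps
  induction ps with
  | nil =>
    intro n picked hdrop hn hpicked
    have hlen : n = 11 := by
      have := congrArg List.length hdrop
      simp [pyPrefer] at this
      omega
    subst hlen
    simpa using hpicked
  | cons p ps' ih =>
    intro n picked hdrop hn hpicked
    have hlt : n < 11 := by
      have := congrArg List.length hdrop
      simp [pyPrefer] at this
      omega
    have hnp : n < pyPrefer.length := by simp [pyPrefer]; omega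
    have hget : pyPrefer.getD n "" = p := by
      have h0 : (pyPrefer.drop n)[0]'(by rw [hdrop]; simp) = p := by
        simp [hdrop]
      rw [List.getD_eq_getElem _ _ hnp, ← h0, List.getElem_drop]
      simp
    have hdrop' : pyPrefer.drop (n + 1) = ps' := by
      rw [← List.tail_drop, hdrop]
      rfl
    rw [List.foldl_cons]
    rw [pvRound cart menu n p hlt hget picked hpicked]
    exact ih (n + 1) _ hdrop' (by omega) rfl

-- A computes the truncated concatenation of all 12 groups
theorem pvA_eq (menu cart : List String) (lang : String) :
    pick_simple_upsell_py menu cart lang = (pvFlat cart menu 12).take 3 := by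
  unfold pick_simple_upsell_py
  rw [pvOuter cart menu pyPrefer 0 [] rfl (by omega) (by simp [pvFlat])]
  exact (congrArg (List.take 3) (pvFallback cart menu _ rfl)).trans (by simp [List.take_take])

-- B's fold invariant: bucket k extends with the priority-k group not yet seen
theorem pvB_fold (cart : List String) :
    ∀ (m : List String) (bkts : List (List String)) (s : PySem.Set String),
      bkts.length = 12 →
      (m.foldl (fun (st : List (List String) × PySem.Set String) it =>
        if PySem.Set.contains st.2 it then st
        else if cart.any (fun c => PySem.Str.isIn c (PySem.Str.lower it)) then st
        else
          (st.1.modify ((pyPrefer.findIdx? (fun p =>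
              PySem.Str.isIn p (PySem.Str.lower it))).getD pyPrefer.length) (fun b => b ++ [it]),
           PySem.Set.add st.2 it)) (bkts, s)).1
      = (List.range 12).map (fun k => bkts.getD k [] ++ pvG cart k s m) := by
  intro m
  induction m with
  | nil =>
    intro bkts s hlen
    simp only [List.foldl_nil, pvG]
    apply List.ext_getElem
    · simp [hlen]
    · intro i h1 h2
      simp at h2
      rw [List.getElem_map, List.getElem_range, List.getD_eq_getElem _ _ (by omega)]
      simp
  | cons it r ih =>
    intro bkts s hlen
    rw [List.foldl_cons]
    by_cases hseen : PySem.Set.contains s it = true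
    · rw [if_pos hseen]
      rw [ih bkts s hlen]
      apply List.map_congr_left
      intro k _
      congr 1
      have hmem : it ∈ s := by simpa using hseen
      rw [pvG, if_neg (by simp [hmem])]
    · rw [if_neg hseen]
      have hns : it ∉ s := by simpa using hseen
      by_cases hcart : (cart.any (fun c => PySem.Str.isIn c (PySem.Str.lower it))) = true
      · rw [if_pos hcart]
        have hok' : pyOkItem cart it = false := by unfold pyOkItem; rw [hcart]; rfl
        rw [ih bkts s hlen]
        apply List.map_congr_left
        intro k _
        congr 1
        rw [pvG, if_neg (by simp [hok'])]
      · rw [if_neg hcart]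
        have hcart' : (cart.any (fun c => PySem.Str.isIn c (PySem.Str.lower it))) = false :=
          Bool.eq_false_iff.mpr (fun h => hcart h)
        have hok : pyOkItem cart it = true := by unfold pyOkItem; rw [hcart']; rfl
        rw [show (pyPrefer.findIdx? (fun p =>
            PySem.Str.isIn p (PySem.Str.lower it))).getD pyPrefer.length = pvPrio it from rfl]
        have hadd : PySem.Set.add s it = s ++ [it] := by
          unfold PySem.Set.add
          rw [if_neg hseen]
        rw [ih _ _ (by rw [List.length_modify]; exact hlen)]
        apply List.map_congr_left
        intro k hk
        rw [List.mem_range] at hk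
        have hprlt : pvPrio it < 12 := by have := pvPrio_le it; omega
        by_cases hke : k = pvPrio it
        · subst hke
          rw [hadd, List.getD_eq_getElem _ _
                (by rw [List.length_modify]; show pvPrio it < bkts.length; omega),
              List.getElem_modify, if_pos rfl]
          rw [pvG, if_pos (by simp [hok, hns])]
          rw [List.getD_eq_getElem bkts _ (by omega)]
          simp
        · have hbeq : (pvPrio it == k) = false := beq_eq_false_iff_ne.mpr (fun h => hke h.symm)
          rw [hadd, List.getD_eq_getElem _ _
                (by rw [List.length_modify]; show k < bkts.length; omega),
              List.getElem_modify, if_neg (fun hcon => hke hcon.symm)]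
          rw [pvG, if_neg (by simp [hbeq])]
          rw [← List.getD_eq_getElem bkts ([] : List String) (show k < bkts.length by omega)]
          congr 1
          apply pvG_congr
          intro x hx hox
          constructor
          · intro hxs
            rcases List.mem_append.mp hxs with h' | h'
            · exact h'
            · exfalso
              rw [List.mem_singleton] at h'
              subst h'
              exact hke hx.symm
          · intro hxs; exact List.mem_append_left _ hxs

theorem pvB_eq (menu cart : List String) (lang : String) :
    pick_simple_upsell_py_alt menu cart lang = (pvFlat cart menu 12).take 3 := by
  unfold pick_simple_upsell_py_alt
  rw [pvB_fold cart menu _ PySem.Set.empty (by simp [pyPrefer])]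
  have hmap : (List.range 12).map
      (fun k => (List.replicate (pyPrefer.length + 1) ([] : List String)).getD k [] ++
        pvG cart k PySem.Set.empty menu)
      = (List.range 12).map (fun k => pvG cart k [] menu) := by
    apply List.map_congr_left
    intro k hk
    rw [List.mem_range] at hk
    rw [List.getD_eq_getElem _ _ (by simp [pyPrefer]; omega)]
    simp [PySem.Set.empty]
  rw [hmap]
  unfold pvFlat
  rw [List.flatMap_def]

-- ===== VERDICT (by name: the statement is the Claim_ definition above) =====
theorem pick_simple_upsell_py_spec : Claim_equal_pick_simple_upsell_py := by
  intro menu cart lang _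
  unfold Spec_pick_simple_upsell_py
  rw [pvA_eq, pvB_eq]
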